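-- pv_equiv track=rewrite | github.com/jomsu1111/ALFworld | env_runner.py | _rerank_loop_prone_action
-- ===== SOURCE A (Python) =====
-- from typing import Dict, List, Set, Tuple
--
-- def _rerank_loop_prone_action(
--     action: str,
--     admissible: List[str],
--     repeated_action_streak: int,
--     no_progress_steps: int,
-- ) -> str:
--     norm_action = action.strip().lower()
--     is_low_value = any(keyword in norm_action for keyword in ["inventory", "look", "examine"])
--     if not is_low_value:
--         return action
--     if repeated_action_streak < 2 and no_progress_steps < 2:
--         return action
--     priority_keywords = ["take", "put", "open", "go to", "heat", "cool", "clean"]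
--     preferred = []
--     for cmd in admissible:
--         cmd_lower = cmd.strip().lower()
--         if cmd_lower == norm_action:
--             continue
--         if any(k in cmd_lower for k in priority_keywords):
--             preferred.append(cmd)
--     if preferred:
--         return preferred[0]
--     alternatives = [cmd for cmd in admissible if cmd.strip().lower() != norm_action]
--     if alternatives:
--         return alternatives[0]
--     return action
-- ===== SOURCE B (Python) =====
-- def _rerank_loop_prone_action(
--     action,
--     admissible,
--     repeated_action_streak,
--     no_progress_steps,
-- ):
--     norm_action = action.strip().lower()
--     if not any(keyword in norm_action for keyword in ["inventory", "look", "examine"]):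
--         return action
--     if repeated_action_streak < 2 and no_progress_steps < 2:
--         return action
--     priority_keywords = ["take", "put", "open", "go to", "heat", "cool", "clean"]
--     first_alternative = None
--     for cmd in admissible:
--         cmd_lower = cmd.strip().lower()
--         if cmd_lower == norm_action:
--             continue
--         if any(k in cmd_lower for k in priority_keywords):
--             return cmd
--         if first_alternative is None:
--             first_alternative = cmd
--     return first_alternative if first_alternative is not None else action
-- ===== Notes on version B (the rewrite author's own statement) =====
-- stated objective: simpler
-- what changed: Replaces A's two separate scans over admissible (building the full preferred list then taking [0], else building the full alternatives list then taking [0]) with one single pass that returns the first priority match immediately and remembers the first non-equal command as fallback.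
import Mathlib
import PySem

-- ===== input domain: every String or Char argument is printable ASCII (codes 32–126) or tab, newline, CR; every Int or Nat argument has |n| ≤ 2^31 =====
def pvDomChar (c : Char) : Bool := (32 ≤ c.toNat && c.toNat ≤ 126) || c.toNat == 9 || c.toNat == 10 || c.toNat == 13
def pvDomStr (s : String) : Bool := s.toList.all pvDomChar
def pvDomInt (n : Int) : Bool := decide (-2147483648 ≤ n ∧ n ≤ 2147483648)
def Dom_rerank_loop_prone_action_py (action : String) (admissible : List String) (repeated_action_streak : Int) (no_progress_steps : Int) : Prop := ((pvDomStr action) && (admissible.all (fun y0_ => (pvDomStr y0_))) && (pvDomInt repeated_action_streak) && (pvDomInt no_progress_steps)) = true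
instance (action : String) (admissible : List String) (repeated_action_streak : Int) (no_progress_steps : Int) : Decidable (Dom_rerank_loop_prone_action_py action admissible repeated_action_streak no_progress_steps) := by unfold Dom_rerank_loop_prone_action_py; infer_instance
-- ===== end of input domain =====

-- B replaces A's two full scans (preferred list then [0], else alternatives list then [0])
-- with a single early-returning pass that remembers the first non-equal fallback: simpler.

-- ===== PORT A =====
def rerank_loop_prone_action_py (action : String) (admissible : List String) (repeated_action_streak : Int) (no_progress_steps : Int) : String :=
  let norm_action := PySem.Str.lower (PySem.Str.strip action)
  let is_low_value := ["inventory", "look", "examine"].any (fun keyword => PySem.Str.isIn keyword norm_action)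
  if !is_low_value then action
  else if repeated_action_streak < 2 ∧ no_progress_steps < 2 then action
  else
    let priority_keywords := ["take", "put", "open", "go to", "heat", "cool", "clean"]
    let preferred := admissible.foldl (fun acc cmd =>
      let cmd_lower := PySem.Str.lower (PySem.Str.strip cmd)
      if cmd_lower == norm_action then acc
      else if priority_keywords.any (fun k => PySem.Str.isIn k cmd_lower) then acc ++ [cmd]
      else acc) []
    match preferred with
    | c :: _ => c
    | [] =>
      let alternatives := admissible.filter (fun cmd => PySem.Str.lower (PySem.Str.strip cmd) != norm_action)
      match alternatives with
      | c :: _ => c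
      | [] => action

-- ===== PORT B =====
-- single pass: return first priority match immediately, remember the first non-equal fallback
def rerank_loop_b (norm_action : String) (priority_keywords : List String) (action : String)
    (first_alternative : Option String) : List String → String
  | [] => first_alternative.getD action
  | cmd :: rest =>
    let cmd_lower := PySem.Str.lower (PySem.Str.strip cmd)
    if cmd_lower == norm_action then
      rerank_loop_b norm_action priority_keywords action first_alternative rest
    else if priority_keywords.any (fun k => PySem.Str.isIn k cmd_lower) then cmd
    else
      rerank_loop_b norm_action priority_keywords action
        (match first_alternative with | none => some cmd | some a => some a) rest

def rerank_loop_prone_action_py_alt (action : String) (admissible : List String) (repeated_action_streak : Int) (no_progress_steps : Int) : String :=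
  let norm_action := PySem.Str.lower (PySem.Str.strip action)
  if !(["inventory", "look", "examine"].any (fun keyword => PySem.Str.isIn keyword norm_action)) then action
  else if repeated_action_streak < 2 ∧ no_progress_steps < 2 then action
  else rerank_loop_b norm_action ["take", "put", "open", "go to", "heat", "cool", "clean"] action none admissible

-- ===== PRECONDITION & SPEC =====
def Spec_rerank_loop_prone_action_py (action : String) (admissible : List String) (repeated_action_streak : Int) (no_progress_steps : Int) (out : String) : Prop := out = rerank_loop_prone_action_py_alt action admissible repeated_action_streak no_progress_steps
instance (action : String) (admissible : List String) (repeated_action_streak : Int) (no_progress_steps : Int) (out : String) : Decidable (Spec_rerank_loop_prone_action_py action admissible repeated_action_streak no_progress_steps out) := by unfold Spec_rerank_loop_prone_action_py; infer_instance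

-- ===== CLAIM (what is proved, stated in full; the proofs are below) =====
def Claim_equal_rerank_loop_prone_action_py : Prop := ∀ (action : String) (admissible : List String) (repeated_action_streak : Int) (no_progress_steps : Int), Dom_rerank_loop_prone_action_py action admissible repeated_action_streak no_progress_steps → Spec_rerank_loop_prone_action_py action admissible repeated_action_streak no_progress_steps (rerank_loop_prone_action_py action admissible repeated_action_streak no_progress_steps)

-- ===== LEMMAS AND PROOFS =====

-- generic form of B's single-pass loop, with abstract tests p (skip) and q (priority)
def pvLoopGen (p q : String → Bool) (dflt : String) (fa : Option String) : List String → String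
  | [] => fa.getD dflt
  | c :: rest =>
    if p c then pvLoopGen p q dflt fa rest
    else if q c then c
    else pvLoopGen p q dflt (match fa with | none => some c | some a => some a) rest

theorem pv_bridge (norm : String) (pks : List String) (action : String) (fa : Option String)
    (cmds : List String) :
    rerank_loop_b norm pks action fa cmds =
    pvLoopGen (fun cmd => PySem.Str.lower (PySem.Str.strip cmd) == norm)
      (fun cmd => pks.any fun k => PySem.Str.isIn k (PySem.Str.lower (PySem.Str.strip cmd)))
      action fa cmds := by
  induction cmds generalizing fa with
  | nil => rfl
  | cons c rest ih => simp only [rerank_loop_b, pvLoopGen, ih]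

theorem pv_gen_loop (p q : String → Bool) (dflt : String) (fa : Option String)
    (cmds : List String) :
    pvLoopGen p q dflt fa cmds =
    match cmds.filter (fun c => !p c && q c) with
    | c :: _ => c
    | [] =>
      match fa with
      | some a => a
      | none =>
        match cmds.filter (fun c => !p c) with
        | c :: _ => c
        | [] => dflt := by
  induction cmds generalizing fa with
  | nil => cases fa <;> rfl
  | cons c rest ih =>
    simp only [pvLoopGen, List.filter_cons]
    by_cases hp : p c <;> by_cases hq : q c <;> cases fa <;> simp [hp, hq, ih]

-- A's accumulator loop, with abstract tests: it builds exactly a filter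
theorem pv_gen_foldl (p q : String → Bool) (cmds acc : List String) :
    cmds.foldl (fun acc c => if p c then acc else if q c then acc ++ [c] else acc) acc
    = acc ++ cmds.filter (fun c => !p c && q c) := by
  induction cmds generalizing acc with
  | nil => simp
  | cons c rest ih => by_cases hp : p c <;> by_cases hq : q c <;> simp [hp, hq, ih]

-- ===== VERDICT (by name: the statement is the Claim_ definition above) =====
theorem rerank_loop_prone_action_py_spec : Claim_equal_rerank_loop_prone_action_py := by
  intro action admissible rs ns _hDom
  simp only [Spec_rerank_loop_prone_action_py, rerank_loop_prone_action_py,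
    rerank_loop_prone_action_py_alt]
  split_ifs with h1 h2
  · rfl
  · rfl
  · have hf :
        admissible.foldl (fun acc cmd =>
          if PySem.Str.lower (PySem.Str.strip cmd) == PySem.Str.lower (PySem.Str.strip action)
          then acc
          else if (["take", "put", "open", "go to", "heat", "cool", "clean"].any
              fun k => PySem.Str.isIn k (PySem.Str.lower (PySem.Str.strip cmd)))
          then acc ++ [cmd] else acc) []
        = [] ++ admissible.filter (fun cmd =>
            !(PySem.Str.lower (PySem.Str.strip cmd) == PySem.Str.lower (PySem.Str.strip action))
            && (["take", "put", "open", "go to", "heat", "cool", "clean"].any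
              fun k => PySem.Str.isIn k (PySem.Str.lower (PySem.Str.strip cmd)))) :=
      pv_gen_foldl _ _ admissible []
    rw [hf, pv_bridge, pv_gen_loop, List.nil_append]
    rfl
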